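-- pv_equiv track=rewrite | github.com/rbasters/ESNSI | version finale.py | recursive2
-- ===== SOURCE A (Python) =====
-- graphe = [
--     [0 ,4 ,2 ,99,99,99,99,99],
--     [4 ,0 ,6 ,99,5 ,99,99,99],
--     [2 ,6 ,0 ,3 ,99,99,99,5 ],
--     [99,99,3 ,0 ,99,3 ,4 ,1 ],
--     [99,5 ,99,99,0 ,2 ,99,99],
--     [99,99,99,3 ,2 ,0 ,7 ,99],
--     [99,99,99,4 ,99,7 ,0 ,10],
--     [99,99,5 ,1 ,99,99,10,0 ]
--     ]
--
-- def determine_adjacents(noeud) -> list: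
--     #************************************************************************
--     # A partir d'un noeud en entrée, la fonction donne la liste des noeuds adjacents
--     # Entrée : Le noeud de départ
--     # Sortie : la liste des noeuds adjacents
--     #************************************************************************
--     # On sélectionne la ligne contenant les noeuds adjacent par rapport a notre point de départ
--     ligne = graphe[noeud]
--
--     # on détermine le nombre de noeuds adjacents pour ce point
--     nb_adjacent = len(ligne)-ligne.count(99)-ligne.count(0)
--
--      # Puis on crée la variable parcours sous forme de liste de listes
--     liste_adjacents = [[] for i in range(0,nb_adjacent)]
--
--     a = 0
--     for i in range(0,len(ligne)):
--         if (ligne[i] != 0 and ligne[i] != 99):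
--             liste_adjacents[a].append(noeud)
--             liste_adjacents[a].append(i)
--             a += 1
--
--     # On retourne la liste des noeuds adjacents
--     return(liste_adjacents)
--
-- def recursive2(liste) -> list:
--     #************************************************************************
--     # La fonction récursive établit la liste exhaustive des chemins possibles
--     # Entrée : La liste de chemins déja établie
--     # Sortie : la liste de chemins jusqu'au noeuds suivants
--     #************************************************************************
--     # On détermine le nombre d'arcs adjacents aux noeuds
--     for i in range(0,len(liste)): # on boucle dans notre liste existante
--         if i == 0:
--             sommets_adjacents = determine_adjacents(liste[i][-1])
--         else:
--             # on filtre les éventuels doublons !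
--             list = determine_adjacents(liste[i][-1])
--             for element in list:
--                 if element not in sommets_adjacents:
--                     sommets_adjacents.append(element)
--     # On identifie les chemins qu'on doit créer, en ignorant les chemins:
--         # - où on revient sur un noeud déja visité
--         # - déja existant dans la liste
--         # Puis on renseigne les chemins possibles
--
--     nb_iterations = len(liste)
--     entrees_a_supprimer = []
--     for i in range(0,nb_iterations) : # on boucle dans notre liste existante
--         if liste[i][-1] != arrivée:  # on ignore les chemins menant déja au point d'arrivée
--             for j in range(0,len(sommets_adjacents)): # on boucle dans la liste qu'on vient d'obtenir
--                 if (sommets_adjacents[j][0] == liste[i][-1] and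
--                     sommets_adjacents[j][-1] != liste[i][0] and
--                     sommets_adjacents[j][-1] not in liste[i]
--                     ):
--                     liste.append(liste[i] + sommets_adjacents[j][1:len(sommets_adjacents)])
--             entrees_a_supprimer.append(i)
--
--     for i in range(0,len(entrees_a_supprimer)):
--         del liste[entrees_a_supprimer[i]-i]
--     return(liste)
--
-- arrivée = 6
-- ===== SOURCE B (Python) =====
-- graphe = [
--     [0 ,4 ,2 ,99,99,99,99,99],
--     [4 ,0 ,6 ,99,5 ,99,99,99],
--     [2 ,6 ,0 ,3 ,99,99,99,5 ],
--     [99,99,3 ,0 ,99,3 ,4 ,1 ],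
--     [99,5 ,99,99,0 ,2 ,99,99],
--     [99,99,99,3 ,2 ,0 ,7 ,99],
--     [99,99,99,4 ,99,7 ,0 ,10],
--     [99,99,5 ,1 ,99,99,10,0 ]
--     ]
--
-- arrivée = 6
--
-- def recursive2(liste) -> list:
--     # Single pass: keep arrivée-ending paths, extend the rest directly from their
--     # last node's row of the graph; no global union of adjacency lists is built.
--     gardes = []
--     nouveaux = []
--     for chemin in liste:
--         if chemin[-1] == arrivée:
--             gardes.append(chemin)
--         else:
--             ligne = graphe[chemin[-1]]
--             for fin, poids in enumerate(ligne):
--                 if poids != 0 and poids != 99 and fin != chemin[0] and fin not in chemin: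
--                     nouveaux.append(chemin + [fin])
--     liste[:] = gardes + nouveaux
--     return liste
-- ===== Notes on version B (the rewrite author's own statement) =====
-- stated objective: simpler
-- what changed: Drops A's two preliminary passes (building a deduplicated global union of adjacency edges, then a delete-index list patched up with offsets): B makes one pass over the paths, reading each non-finished path's graph row directly and rebuilding the list as kept-paths ++ extensions.
import Mathlib
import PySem

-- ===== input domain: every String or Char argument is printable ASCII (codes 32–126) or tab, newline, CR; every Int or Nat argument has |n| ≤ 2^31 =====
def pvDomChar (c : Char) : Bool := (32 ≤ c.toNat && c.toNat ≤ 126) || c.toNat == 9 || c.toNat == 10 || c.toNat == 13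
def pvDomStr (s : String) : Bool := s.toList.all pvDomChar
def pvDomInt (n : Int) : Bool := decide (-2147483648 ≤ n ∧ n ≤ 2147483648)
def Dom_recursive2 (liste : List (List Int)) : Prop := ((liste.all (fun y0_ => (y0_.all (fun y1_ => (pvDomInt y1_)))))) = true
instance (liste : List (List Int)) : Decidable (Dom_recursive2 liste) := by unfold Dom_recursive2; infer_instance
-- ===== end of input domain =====

-- B replaces A's three passes (global deduplicated edge union, extension loop over that union,
-- then a delete-index pass) by one pass that reads each unfinished path's graph row directly and
-- rebuilds the list as kept-paths ++ extensions. Both Pythons mutate `liste` in place to the same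
-- final contents (A by append/del, B by liste[:] = ...); the theorems are about the return value.

-- ===== PORT A =====
-- module constants shared by both programs
def graphe : List (List Int) := [
    [0,4,2,99,99,99,99,99],
    [4,0,6,99,5,99,99,99],
    [2,6,0,3,99,99,99,5],
    [99,99,3,0,99,3,4,1],
    [99,5,99,99,0,2,99,99],
    [99,99,99,3,2,0,7,99],
    [99,99,99,4,99,7,0,10],
    [99,99,5,1,99,99,10,0]]

def arrivée : Int := 6

-- chemin[-1] (paths admitted by Pre_ are nonempty, so the default is never read)
def lastV (c : List Int) : Int := PySem.List.pyGetD c (-1) 0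

def determine_adjacents (noeud : Int) : List (List Int) :=
  let ligne := (PySem.List.pyGet? graphe noeud).getD []   -- graphe[noeud]; Pre_ keeps the index in range
  let nb_adjacent : Int := PySem.List.len ligne - (ligne.count 99 : Int) - (ligne.count 0 : Int)
  -- for i in range(0,len(ligne)): if ligne[i] != 0 and != 99: liste_adjacents[a] += [noeud, i]; a += 1
  (((PySem.List.enumerate ligne 0).foldl
    (fun (st : List (List Int) × Nat) q =>
      if q.2 ≠ 0 ∧ q.2 ≠ 99 then
        (st.1.set st.2 (st.1.getD st.2 [] ++ [noeud, q.1]), st.2 + 1)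
      else st)
    (List.replicate nb_adjacent.toNat ([] : List Int), 0)).1)

-- "for element in list: if element not in sommets_adjacents: sommets_adjacents.append(element)"
def ajoute_sans_doublons (sommets_adjacents lst : List (List Int)) : List (List Int) :=
  lst.foldl (fun S element => if element ∈ S then S else S ++ [element]) sommets_adjacents

-- first loop of recursive2
def union_adjacents (liste : List (List Int)) : List (List Int) :=
  (PySem.List.enumerate liste 0).foldl
    (fun S (p : Int × List Int) =>
      if p.1 = 0 then determine_adjacents (lastV p.2)
      else ajoute_sans_doublons S (determine_adjacents (lastV p.2)))
    []

-- inner j-loop of the second loop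
def innerA (sommets : List (List Int)) (chemin : List Int) (L : List (List Int)) : List (List Int) :=
  sommets.foldl
    (fun L e =>
      if PySem.List.pyGetD e 0 0 = lastV chemin ∧
         PySem.List.pyGetD e (-1) 0 ≠ PySem.List.pyGetD chemin 0 0 ∧
         PySem.List.pyGetD e (-1) 0 ∉ chemin
      then L ++ [chemin ++ PySem.List.slice e (some 1) (some (PySem.List.len sommets))]
      else L)
    L

-- body of the second loop
def boucle2 (sommets : List (List Int)) (st : List (List Int) × List Nat) (i : Nat) :
    List (List Int) × List Nat :=
  let chemin := PySem.List.pyGetD st.1 (i : Int) []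
  if lastV chemin ≠ arrivée then (innerA sommets chemin st.1, st.2 ++ [i]) else st

def recursive2 (liste : List (List Int)) : List (List Int) :=
  let sommets := union_adjacents liste
  let st := (List.range liste.length).foldl (boucle2 sommets) (liste, [])
  -- for i in range(0,len(entrees_a_supprimer)): del liste[entrees_a_supprimer[i]-i]
  (PySem.List.enumerate st.2 0).foldl
    (fun L (q : Int × Nat) => L.eraseIdx (q.2 - q.1.toNat)) st.1

-- ===== PORT B =====
-- inner loop of B: extensions of one unfinished path, straight off its last node's graph row
def extB (chemin : List Int) : List (List Int) :=
  let ligne := (PySem.List.pyGet? graphe (lastV chemin)).getD []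
  (PySem.List.enumerate ligne 0).foldl
    (fun acc (q : Int × Int) =>
      if q.2 ≠ 0 ∧ q.2 ≠ 99 ∧ q.1 ≠ PySem.List.pyGetD chemin 0 0 ∧ q.1 ∉ chemin
      then acc ++ [chemin ++ [q.1]] else acc)
    []

def recursive2_alt (liste : List (List Int)) : List (List Int) :=
  let st := liste.foldl
    (fun (st : List (List Int) × List (List Int)) chemin =>
      if lastV chemin = arrivée then (st.1 ++ [chemin], st.2)
      else (st.1, st.2 ++ extB chemin))
    ([], [])
  st.1 ++ st.2

-- ===== PRECONDITION & SPEC =====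
-- Pre_ excludes exactly the inputs where the Python A raises IndexError: a path that is empty
-- (liste[i][-1]) or whose last node is not a valid Python index into the 8-row graph.
def Pre_recursive2 (liste : List (List Int)) : Prop :=
  ∀ c ∈ liste, c ≠ [] ∧ -8 ≤ c.getLastD 0 ∧ c.getLastD 0 < 8
instance (liste : List (List Int)) : Decidable (Pre_recursive2 liste) := by
  unfold Pre_recursive2; infer_instance

def pvWitness_recursive2 : List (List Int) := [[0], [2, 6]]

def Spec_recursive2 (liste : List (List Int)) (out : List (List Int)) : Prop := out = recursive2_alt liste
instance (liste : List (List Int)) (out : List (List Int)) : Decidable (Spec_recursive2 liste out) := by unfold Spec_recursive2; infer_instance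

-- ===== CLAIM (what is proved, stated in full; the proofs are below) =====
def Claim_equal_recursive2 : Prop := ∀ (liste : List (List Int)), Dom_recursive2 liste → Pre_recursive2 liste → Spec_recursive2 liste (recursive2 liste)

-- ===== LEMMAS AND PROOFS =====

-- ---- characterisation of determine_adjacents ----
def goodW : Int × Int → Bool := fun q => decide (q.2 ≠ 0 ∧ q.2 ≠ 99)

theorem counts_partition (xs : List Int) :
    xs.countP (fun v => decide (v ≠ 0 ∧ v ≠ 99)) + xs.count 99 + xs.count 0 = xs.length := by
  induction xs with
  | nil => rfl
  | cons v xs ih =>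
    simp only [List.countP_cons, List.count_cons, List.length_cons]
    by_cases h0 : v = 0 <;> by_cases h99 : v = 99 <;> simp [h0, h99] at ih ⊢ <;> omega

theorem countP_enumerate (xs : List Int) (s : Int) (p : Int → Bool) :
    (PySem.List.enumerate xs s).countP (fun q => p q.2) = xs.countP p := by
  induction xs generalizing s with
  | nil => rfl
  | cons v xs ih => simp [PySem.List.enumerate_cons, List.countP_cons, ih]

theorem repl_loop (noeud : Int) (qs : List (Int × Int)) : ∀ (D : List (List Int)),
    ((qs.foldl (fun (st : List (List Int) × Nat) q =>
        if q.2 ≠ 0 ∧ q.2 ≠ 99 then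
          (st.1.set st.2 (st.1.getD st.2 [] ++ [noeud, q.1]), st.2 + 1)
        else st)
      (D ++ List.replicate (qs.countP goodW) [], D.length)).1)
    = D ++ (qs.filter goodW).map (fun q => [noeud, q.1]) := by
  induction qs with
  | nil => intro D; simp
  | cons q qs ih =>
    intro D
    by_cases h : q.2 ≠ 0 ∧ q.2 ≠ 99
    · have hg : goodW q = true := by simp [goodW, h]
      have hrep : List.countP goodW (q :: qs) = List.countP goodW qs + 1 := by
        simp [hg]
      rw [hrep, List.replicate_succ]
      simp only [List.foldl_cons, if_pos h]
      have hget : (D ++ ([] : List Int) :: List.replicate (List.countP goodW qs) []).getD D.length [] = [] := by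
        simp [List.getD]
      have hset : (D ++ ([] : List Int) :: List.replicate (List.countP goodW qs) []).set D.length ([] ++ [noeud, q.1])
          = (D ++ [[noeud, q.1]]) ++ List.replicate (List.countP goodW qs) [] := by
        rw [List.set_append_right _ _ (le_refl _)]
        simp
      rw [hget, hset]
      have := ih (D ++ [[noeud, q.1]])
      simp only [List.length_append, List.length_cons, List.length_nil] at this
      simpa [hg] using this
    · have hg : goodW q = false := by simp [goodW]; tauto
      have hrep : List.countP goodW (q :: qs) = List.countP goodW qs := by
        simp [hg]
      rw [hrep]
      simp only [List.foldl_cons, if_neg h]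
      simpa [hg] using ih D

theorem adj_char (noeud : Int) :
    determine_adjacents noeud =
      ((PySem.List.enumerate ((PySem.List.pyGet? graphe noeud).getD []) 0).filter goodW).map
        (fun q => [noeud, q.1]) := by
  unfold determine_adjacents
  simp only []
  have hcnt : (PySem.List.len ((PySem.List.pyGet? graphe noeud).getD []) -
      (((PySem.List.pyGet? graphe noeud).getD []).count 99 : Int) -
      (((PySem.List.pyGet? graphe noeud).getD []).count 0 : Int)).toNat
      = (PySem.List.enumerate ((PySem.List.pyGet? graphe noeud).getD []) 0).countP goodW := by
    have h1 := counts_partition ((PySem.List.pyGet? graphe noeud).getD [])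
    have h2 := countP_enumerate ((PySem.List.pyGet? graphe noeud).getD []) 0
      (fun v => decide (v ≠ 0 ∧ v ≠ 99))
    simp only [PySem.List.len_eq]
    rw [show (PySem.List.enumerate ((PySem.List.pyGet? graphe noeud).getD []) 0).countP goodW
        = ((PySem.List.pyGet? graphe noeud).getD []).countP (fun v => decide (v ≠ 0 ∧ v ≠ 99)) from h2]
    omega
  rw [hcnt]
  simpa using repl_loop noeud (PySem.List.enumerate ((PySem.List.pyGet? graphe noeud).getD []) 0) []

theorem adj_mem {noeud : Int} {e : List Int} (h : e ∈ determine_adjacents noeud) :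
    ∃ i : Int, e = [noeud, i] := by
  rw [adj_char] at h
  obtain ⟨q, _, rfl⟩ := List.mem_map.mp h
  exact ⟨q.1, rfl⟩

theorem adj_head (noeud : Int) : ∀ e ∈ determine_adjacents noeud,
    PySem.List.pyGetD e 0 0 = noeud := by
  intro e he; obtain ⟨i, rfl⟩ := adj_mem he; rfl

theorem adj_nodup (noeud : Int) : (determine_adjacents noeud).Nodup := by
  rw [adj_char]
  have hpw := PySem.List.pairwise_lt_enumerate ((PySem.List.pyGet? graphe noeud).getD []) 0
  have hf := hpw.filter goodW
  refine (hf.map _ ?_)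
  intro a b hab h
  have : a.1 = b.1 := by
    have := congrArg (fun l => PySem.List.pyGetD l (-1) 0) h
    simpa using this
  omega

theorem adj_len2 (n : Int) (h1 : -8 ≤ n) (h2 : n < 8) : 2 ≤ (determine_adjacents n).length := by
  interval_cases n <;> decide

-- ---- the union loop: invariant ----
def stepA (S : List (List Int)) (m : Int) : List (List Int) :=
  ajoute_sans_doublons S (determine_adjacents m)

def InvS (S : List (List Int)) (ns : List Int) : Prop :=
  ∀ n : Int, S.filter (fun e => decide (PySem.List.pyGetD e 0 0 = n)) =
    if n ∈ ns then determine_adjacents n else []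

theorem ajoute_cons (S : List (List Int)) (e : List Int) (es : List (List Int)) :
    ajoute_sans_doublons S ([e] ++ es) = ajoute_sans_doublons (if e ∈ S then S else S ++ [e]) es := rfl

theorem ajoute_subset : ∀ (es S : List (List Int)), (∀ e ∈ es, e ∈ S) →
    ajoute_sans_doublons S es = S := by
  intro es
  induction es with
  | nil => intro S _; rfl
  | cons e es ih =>
    intro S h
    rw [show (e :: es) = [e] ++ es from rfl, ajoute_cons, if_pos (h e (List.mem_cons_self ..))]
    exact ih S (fun x hx => h x (List.mem_cons_of_mem _ hx))

theorem ajoute_disjoint : ∀ (es S : List (List Int)), (∀ e ∈ es, e ∉ S) → es.Nodup →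
    ajoute_sans_doublons S es = S ++ es := by
  intro es
  induction es with
  | nil => intro S _ _; simp [ajoute_sans_doublons]
  | cons e es ih =>
    intro S h hnd
    rw [show (e :: es) = [e] ++ es from rfl, ajoute_cons, if_neg (h e (List.mem_cons_self ..))]
    rw [ih (S ++ [e]) ?_ hnd.of_cons]
    · simp
    · intro x hx
      simp only [List.mem_append, List.mem_singleton]
      rintro (hS | rfl)
      · exact h x (List.mem_cons_of_mem _ hx) hS
      · exact (List.nodup_cons.mp hnd).1 hx

theorem invs_congr (S : List (List Int)) (ns ns' : List Int)
    (h : ∀ n : Int, n ∈ ns ↔ n ∈ ns') (hI : InvS S ns) : InvS S ns' := by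
  intro n
  have hI' := hI n
  by_cases hn : n ∈ ns'
  · rw [if_pos ((h n).mpr hn)] at hI'
    rw [if_pos hn]
    exact hI'
  · rw [if_neg (fun hh => hn ((h n).mp hh))] at hI'
    rw [if_neg hn]
    exact hI'

theorem invs_init (m : Int) : InvS (determine_adjacents m) [m] := by
  intro n
  by_cases hn : n = m
  · subst hn
    rw [if_pos (List.mem_singleton.mpr rfl)]
    exact List.filter_eq_self.mpr (fun e he => by simp [adj_head n e he])
  · rw [if_neg (by simp [hn])]
    exact List.filter_eq_nil_iff.mpr (fun e he => by simp [adj_head m e he]; omega)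

theorem invs_step (S : List (List Int)) (ns : List Int) (m : Int)
    (hI : InvS S ns) : InvS (stepA S m) (m :: ns) := by
  by_cases hm : m ∈ ns
  · have hsub : ∀ e ∈ determine_adjacents m, e ∈ S := by
      intro e he
      have h2 := hI m
      rw [if_pos hm] at h2
      exact List.mem_of_mem_filter (h2 ▸ he)
    unfold stepA
    rw [ajoute_subset _ _ hsub]
    exact invs_congr _ _ _
      (by intro n; simp only [List.mem_cons]
          exact ⟨fun h => Or.inr h, fun h => h.elim (fun hh => hh ▸ hm) id⟩) hI
  · have hdisj : ∀ e ∈ determine_adjacents m, e ∉ S := by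
      intro e he hS
      have h2 := hI m
      rw [if_neg hm] at h2
      have hmem : e ∈ S.filter (fun e => decide (PySem.List.pyGetD e 0 0 = m)) :=
        List.mem_filter.mpr ⟨hS, by simp [adj_head m e he]⟩
      rw [h2] at hmem
      simp at hmem
    unfold stepA
    rw [ajoute_disjoint _ _ hdisj (adj_nodup m)]
    intro n
    rw [List.filter_append, hI n]
    by_cases hn : n = m
    · subst hn
      rw [if_neg hm, if_pos (List.mem_cons_self ..), List.nil_append]
      exact List.filter_eq_self.mpr (fun e he => by simp [adj_head n e he])
    · have hfil : (determine_adjacents m).filter (fun e => decide (PySem.List.pyGetD e 0 0 = n)) = [] :=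
        List.filter_eq_nil_iff.mpr (fun e he => by simp [adj_head m e he]; omega)
      rw [hfil]
      by_cases hns : n ∈ ns <;> simp [hns, hn]

theorem invs_fold : ∀ (ms : List Int) (S : List (List Int)) (ns : List Int),
    InvS S ns → InvS (ms.foldl stepA S) (ms ++ ns) := by
  intro ms
  induction ms with
  | nil => intro S ns h; simpa using h
  | cons m ms ih =>
    intro S ns h
    have := ih (stepA S m) (m :: ns) (invs_step S ns m h)
    refine invs_congr _ _ _ ?_ this
    intro n; simp only [List.mem_append, List.mem_cons]; tauto

theorem enumFold (r : List (List Int)) : ∀ (s : Int), 1 ≤ s → ∀ (S : List (List Int)),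
    (PySem.List.enumerate r s).foldl
      (fun S (p : Int × List Int) =>
        if p.1 = 0 then determine_adjacents (lastV p.2)
        else ajoute_sans_doublons S (determine_adjacents (lastV p.2)))
      S = (r.map lastV).foldl stepA S := by
  induction r with
  | nil => intro s _ S; rfl
  | cons c r ih =>
    intro s hs S
    rw [PySem.List.enumerate_cons]
    simp only [List.foldl_cons, List.map_cons]
    rw [if_neg (by omega)]
    exact ih (s + 1) (by omega) _

theorem union_eq (c : List Int) (r : List (List Int)) :
    union_adjacents (c :: r) = (r.map lastV).foldl stepA (determine_adjacents (lastV c)) := by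
  unfold union_adjacents
  rw [PySem.List.enumerate_cons]
  simp only [List.foldl_cons, if_pos]
  exact enumFold r 1 (by omega) _

-- ---- the inner extension loop equals B's row scan ----
theorem foldl_append_ifP {α β : Type} (P : α → Prop) [DecidablePred P] (f : α → β)
    (l : List α) (acc : List β) :
    l.foldl (fun acc x => if P x then acc ++ [f x] else acc) acc
      = acc ++ (l.filter (fun x => decide (P x))).map f := by
  have hfun : (fun (acc : List β) x => if P x then acc ++ [f x] else acc)
      = (fun acc x => if (fun x => decide (P x)) x = true then acc ++ [f x] else acc) := by
    funext acc x
    by_cases h : P x <;> simp [h]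
  rw [hfun, PySem.List.foldl_append_if]

theorem pair_last (a b : Int) : PySem.List.pyGetD [a, b] (-1) 0 = b := rfl

theorem slice_pair (a b : Int) (S : List (List Int)) (hlen : 2 ≤ (S.length : Int)) :
    PySem.List.slice [a, b] (some 1) (some (PySem.List.len S)) = [b] := by
  have hb : (0 : Int) ≤ PySem.List.len S := by
    simp [PySem.List.len_eq]
  have h2 : 2 ≤ S.length := by exact_mod_cast hlen
  rw [PySem.List.slice_toNat [a, b] (a := 1) (b := PySem.List.len S) (by omega) hb]
  simp only [PySem.List.len_eq, Int.toNat_natCast, Int.toNat_one, List.drop_succ_cons,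
    List.drop_zero]
  exact List.take_of_length_le (by simp; omega)

theorem core_ext (chemin : List Int) (n : Int) (hn : lastV chemin = n) :
    ((determine_adjacents n).filter
        (fun e => decide (PySem.List.pyGetD e (-1) 0 ≠ PySem.List.pyGetD chemin 0 0 ∧
                          PySem.List.pyGetD e (-1) 0 ∉ chemin))).map
      (fun e => chemin ++ e.drop 1) = extB chemin := by
  unfold extB
  simp only [hn]
  rw [adj_char, List.filter_map, List.map_map, List.filter_filter, foldl_append_ifP,
    List.nil_append]
  have hmap : ((fun e => chemin ++ List.drop 1 e) ∘ fun q : Int × Int => [n, q.1])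
      = (fun q : Int × Int => chemin ++ [q.1]) := by
    funext q; simp
  rw [hmap]
  congr 1
  apply List.filter_congr
  intro q hq
  by_cases h1 : q.2 ≠ 0 <;> by_cases h2 : q.2 ≠ 99 <;>
    by_cases h3 : q.1 ≠ PySem.List.pyGetD chemin 0 0 <;> by_cases h4 : q.1 ∉ chemin <;>
    simp [goodW, pair_last, Function.comp, h1, h2, h3, h4]

theorem innerA_spec (S : List (List Int)) (chemin : List Int)
    (hfilt : S.filter (fun e => decide (PySem.List.pyGetD e 0 0 = lastV chemin)) =
      determine_adjacents (lastV chemin))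
    (hlen : 2 ≤ (S.length : Int)) (L : List (List Int)) :
    innerA S chemin L = L ++ extB chemin := by
  unfold innerA
  rw [foldl_append_ifP]
  congr 1
  have hsplit : (fun e => decide (PySem.List.pyGetD e 0 0 = lastV chemin ∧
      PySem.List.pyGetD e (-1) 0 ≠ PySem.List.pyGetD chemin 0 0 ∧
      PySem.List.pyGetD e (-1) 0 ∉ chemin))
      = (fun e : List Int => decide (PySem.List.pyGetD e 0 0 = lastV chemin) &&
          decide (PySem.List.pyGetD e (-1) 0 ≠ PySem.List.pyGetD chemin 0 0 ∧
      PySem.List.pyGetD e (-1) 0 ∉ chemin)) := by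
    funext e; simp [Bool.decide_and]
  rw [hsplit, ← List.filter_filter, List.filter_comm, hfilt]
  rw [List.map_congr_left ?_]
  · exact core_ext chemin (lastV chemin) rfl
  · intro e he
    obtain ⟨i, rfl⟩ := adj_mem (List.mem_of_mem_filter he)
    rw [slice_pair _ _ _ hlen]
    rfl

-- ---- B's fold, the second loop of A, and the deletion loop ----
def keptF (xs : List (List Int)) : List (List Int) :=
  xs.filter (fun c => decide (lastV c = arrivée))

def extsF (xs : List (List Int)) : List (List Int) :=
  (xs.filter (fun c => !decide (lastV c = arrivée))).flatMap extB

def idxs : List (List Int) → Nat → List Nat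
  | [], _ => []
  | c :: r, s => if lastV c = arrivée then idxs r (s + 1) else s :: idxs r (s + 1)

theorem altPair : ∀ (xs : List (List Int)) (k nw : List (List Int)),
    xs.foldl (fun (st : List (List Int) × List (List Int)) chemin =>
        if lastV chemin = arrivée then (st.1 ++ [chemin], st.2)
        else (st.1, st.2 ++ extB chemin)) (k, nw)
      = (k ++ keptF xs, nw ++ extsF xs) := by
  intro xs
  induction xs with
  | nil => intro k nw; simp [keptF, extsF]
  | cons c xs ih =>
    intro k nw
    by_cases hc : lastV c = arrivée
    · simp only [List.foldl_cons, if_pos hc]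
      rw [ih]
      simp [keptF, extsF, hc]
    · simp only [List.foldl_cons, if_neg hc]
      rw [ih]
      simp [keptF, extsF, hc]

theorem alt_eq (liste : List (List Int)) :
    recursive2_alt liste = keptF liste ++ extsF liste := by
  unfold recursive2_alt
  rw [altPair]
  simp

theorem phase2 (sommets : List (List Int)) :
    ∀ (suf pre E : List (List Int)) (D : List Nat),
    (∀ chemin ∈ suf, ∀ L, innerA sommets chemin L = L ++ extB chemin) →
    (List.range' pre.length suf.length).foldl (boucle2 sommets) (pre ++ (suf ++ E), D)
      = (pre ++ (suf ++ (E ++ extsF suf)), D ++ idxs suf pre.length) := by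
  intro suf
  induction suf with
  | nil => intro pre E D _; simp [extsF, idxs]
  | cons c suf ih =>
    intro pre E D hext
    rw [List.length_cons, List.range'_succ]
    simp only [List.foldl_cons]
    have hch : PySem.List.pyGetD (pre ++ (c :: suf ++ E)) (pre.length : Int) [] = c := by
      rw [PySem.List.pyGetD_natCast]
      simp [List.getD]
    by_cases hc : lastV c = arrivée
    · have hb : boucle2 sommets (pre ++ (c :: suf ++ E), D) pre.length = (pre ++ (c :: suf ++ E), D) := by
        unfold boucle2
        simp only [hch]
        rw [if_neg (show ¬(lastV c ≠ arrivée) from fun h => h hc)]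
      rw [hb]
      have := ih (pre ++ [c]) E D (fun x hx L => hext x (List.mem_cons_of_mem _ hx) L)
      simp only [List.length_append, List.length_cons, List.length_nil, List.append_assoc,
        List.cons_append, List.nil_append, Nat.zero_add] at this ⊢
      rw [this]
      simp [extsF, idxs, hc]
    · have hb : boucle2 sommets (pre ++ (c :: suf ++ E), D) pre.length
          = ((pre ++ (c :: suf ++ E)) ++ extB c, D ++ [pre.length]) := by
        unfold boucle2
        simp only [hch]
        rw [if_pos hc, hext c (List.mem_cons_self ..) _]
      rw [hb]
      have := ih (pre ++ [c]) (E ++ extB c) (D ++ [pre.length])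
        (fun x hx L => hext x (List.mem_cons_of_mem _ hx) L)
      simp only [List.length_append, List.length_cons, List.length_nil, List.append_assoc,
        List.cons_append, List.nil_append, Nat.zero_add] at this ⊢
      rw [this]
      simp [extsF, idxs, hc]

theorem del_spec : ∀ (xs done rest : List (List Int)) (j s : Nat),
    s - j = done.length → j ≤ s →
    (PySem.List.enumerate (idxs xs s) (j : Int)).foldl
        (fun L (q : Int × Nat) => L.eraseIdx (q.2 - q.1.toNat)) (done ++ (xs ++ rest))
      = done ++ (keptF xs ++ rest) := by
  intro xs
  induction xs with
  | nil => intro done rest j s _ _; simp [idxs, keptF]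
  | cons c xs ih =>
    intro done rest j s hlen hj
    by_cases hc : lastV c = arrivée
    · rw [show idxs (c :: xs) s = idxs xs (s + 1) from by simp [idxs, hc]]
      have := ih (done ++ [c]) rest j (s + 1) (by simp; omega) (by omega)
      simp only [List.append_assoc, List.cons_append, List.nil_append] at this ⊢
      rw [this]
      simp [keptF, hc]
    · rw [show idxs (c :: xs) s = s :: idxs xs (s + 1) from by simp [idxs, hc]]
      rw [PySem.List.enumerate_cons]
      simp only [List.foldl_cons]
      have herase : (done ++ (c :: (xs ++ rest))).eraseIdx (s - (j : Int).toNat) = done ++ (xs ++ rest) := by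
        rw [Int.toNat_natCast, hlen]
        simp [List.eraseIdx_append_of_length_le]
      rw [show ((j : Int) + 1) = ((j + 1 : Nat) : Int) from by push_cast; ring]
      simp only [List.cons_append]
      rw [herase]
      rw [ih done rest (j + 1) (s + 1) (by omega) (by omega)]
      simp [keptF, hc]

-- ===== VERDICT (by name: the statement is the Claim_ definition above) =====
theorem lastV_eq (c : List Int) (h : c ≠ []) : lastV c = c.getLastD 0 := by
  unfold lastV
  rw [PySem.List.pyGetD_neg_one c 0 h]
  simp [List.getLastD_eq_getLast?, List.getLast?_eq_getLast_of_ne_nil h]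

theorem recursive2_spec : Claim_equal_recursive2 := by
  unfold Claim_equal_recursive2
  intro liste _ hpre
  unfold Spec_recursive2
  rw [alt_eq]
  cases liste with
  | nil => decide
  | cons c r =>
    have hok : ∀ x ∈ c :: r, -8 ≤ lastV x ∧ lastV x < 8 := by
      intro x hx
      obtain ⟨hne, h1, h2⟩ := hpre x hx
      rw [lastV_eq x hne]
      exact ⟨h1, h2⟩
    have hInv : InvS (union_adjacents (c :: r)) (r.map lastV ++ [lastV c]) := by
      rw [union_eq]
      exact invs_fold _ _ _ (invs_init (lastV c))
    have hfilt : ∀ x ∈ c :: r,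
        (union_adjacents (c :: r)).filter (fun e => decide (PySem.List.pyGetD e 0 0 = lastV x))
          = determine_adjacents (lastV x) := by
      intro x hx
      have hI := hInv (lastV x)
      rw [if_pos ?_] at hI
      · exact hI
      · rcases List.mem_cons.mp hx with rfl | hxr
        · exact List.mem_append_right _ (List.mem_singleton.mpr rfl)
        · exact List.mem_append_left _ (List.mem_map_of_mem hxr)
    have hlen : 2 ≤ ((union_adjacents (c :: r)).length : Int) := by
      have h1 := hfilt c (List.mem_cons_self ..)
      have h2 := List.length_filter_le
        (fun e => decide (PySem.List.pyGetD e 0 0 = lastV c)) (union_adjacents (c :: r))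
      have h3 := adj_len2 (lastV c) (hok c (List.mem_cons_self ..)).1 (hok c (List.mem_cons_self ..)).2
      rw [h1] at h2
      have : 2 ≤ (union_adjacents (c :: r)).length := le_trans h3 h2
      exact_mod_cast this
    have hext : ∀ x ∈ c :: r, ∀ L, innerA (union_adjacents (c :: r)) x L = L ++ extB x :=
      fun x hx L => innerA_spec _ x (hfilt x hx) hlen L
    have hph : (List.range' 0 (c :: r).length).foldl (boucle2 (union_adjacents (c :: r)))
        (c :: r, ([] : List Nat)) = ((c :: r) ++ extsF (c :: r), idxs (c :: r) 0) := by
      have h := phase2 (union_adjacents (c :: r)) (c :: r) [] [] [] hext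
      simpa using h
    have hdel := del_spec (c :: r) [] (extsF (c :: r)) 0 0 rfl (le_refl 0)
    simp only [List.nil_append, Nat.cast_zero] at hdel
    unfold recursive2
    simp only []
    rw [List.range_eq_range', hph]
    exact hdel
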